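-- pv_equiv track=rewrite | github.com/hugzito/2nd_year_project_group13 | phase_3/skip_gram.py | rob_skipgram
-- ===== SOURCE A (Python) =====
-- def rob_skipgram(tokenized_sents, tokenizer, word2idx, window_size):
--     PAD = '<PAD>'
--     fullData = []
--     labels = []
--     for sent in tokenized_sents:
--         for tgtIdx in range(len(tokenized_sents[sent])):
--             labels.append(word2idx[tokenized_sents[sent][tgtIdx]])
--             dataLine = []
--             # backwards
--             for dist in reversed(range(1,window_size+1)):
--                 srcIdx = tgtIdx - dist
--                 if srcIdx < 0:
--                     dataLine.append(word2idx[PAD])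
--                 else:
--                     dataLine.append(word2idx[tokenized_sents[sent][srcIdx]])
--             # forwards
--             for dist in range(1,window_size+1):
--                 srcIdx = tgtIdx + dist
--                 if srcIdx >= len(tokenized_sents[sent]):
--                     dataLine.append(word2idx[PAD])
--                 else:
--                     dataLine.append(word2idx[tokenized_sents[sent][srcIdx]])
--             fullData.append(dataLine)
--     return fullData, labels
-- ===== SOURCE B (Python) =====
-- def rob_skipgram(tokenized_sents, tokenizer, word2idx, window_size):
--     PAD = '<PAD>'
--     w = max(window_size, 0)
--     fullData = []
--     labels = []
--     for sent in tokenized_sents: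
--         toks = tokenized_sents[sent]
--         idxs = [word2idx[t] for t in toks]
--         pad = [word2idx[PAD]] * w if (toks and w) else []
--         padded = pad + idxs + pad
--         for i in range(len(toks)):
--             labels.append(idxs[i])
--             fullData.append(padded[i:i+w] + padded[i+w+1:i+2*w+1])
--     return fullData, labels
-- ===== Notes on version B (the rewrite author's own statement) =====
-- stated objective: alternative
-- what changed: Replaces A's two per-target distance loops with bounds checks by building, per sentence, the index list once plus a PAD-padded array and emitting each context window as two slices of it.
import Mathlib
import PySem

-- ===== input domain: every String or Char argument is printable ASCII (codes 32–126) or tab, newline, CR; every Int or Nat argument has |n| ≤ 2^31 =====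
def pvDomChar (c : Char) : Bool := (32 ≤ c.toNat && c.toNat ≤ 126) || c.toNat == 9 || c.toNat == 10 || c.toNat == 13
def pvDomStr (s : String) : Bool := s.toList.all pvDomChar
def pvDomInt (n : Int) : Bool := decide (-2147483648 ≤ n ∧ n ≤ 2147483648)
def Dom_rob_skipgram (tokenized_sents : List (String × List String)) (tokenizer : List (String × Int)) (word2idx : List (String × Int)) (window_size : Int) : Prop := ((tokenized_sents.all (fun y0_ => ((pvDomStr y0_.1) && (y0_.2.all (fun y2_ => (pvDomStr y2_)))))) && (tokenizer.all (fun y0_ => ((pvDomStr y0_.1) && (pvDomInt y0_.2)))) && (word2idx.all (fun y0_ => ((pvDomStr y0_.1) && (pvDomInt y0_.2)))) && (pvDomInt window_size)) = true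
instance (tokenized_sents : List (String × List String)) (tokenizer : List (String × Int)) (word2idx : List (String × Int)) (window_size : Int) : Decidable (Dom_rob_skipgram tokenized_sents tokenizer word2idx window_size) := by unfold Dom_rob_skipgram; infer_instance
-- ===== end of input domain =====

-- ===== PORT A =====
-- B replaces the two per-target distance loops (with bounds checks) by one padded
-- index array per sentence and two slices per target; alternative decomposition, same cost.
-- A-side helpers (shared lookups: Python dict lookup with the guaranteed-hit default)
def w2iGet (word2idx : List (String × Int)) (t : String) : Int :=
  PySem.Dict.getD (PySem.Dict.mk word2idx) t 0
def sentsGet (tokenized_sents : List (String × List String)) (s : String) : List String :=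
  PySem.Dict.getD (PySem.Dict.mk tokenized_sents) s []
def tokAt (toks : List String) (j : Int) : String :=
  (PySem.List.pyGet? toks j).getD ""

def rob_skipgram (tokenized_sents : List (String × List String)) (tokenizer : List (String × Int)) (word2idx : List (String × Int)) (window_size : Int) : List (List Int) × List Int :=
  tokenized_sents.foldl (fun acc p =>
    let toks := sentsGet tokenized_sents p.1
    (PySem.List.pyRange 0 (toks.length : Int) 1).foldl (fun acc2 tgtIdx =>
      let labels := acc2.2 ++ [w2iGet word2idx (tokAt toks tgtIdx)]
      -- backwards
      let dataLine := ((PySem.List.pyRange 1 (window_size + 1) 1).reverse).foldl (fun dl dist =>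
        let srcIdx := tgtIdx - dist
        if srcIdx < 0 then dl ++ [w2iGet word2idx "<PAD>"]
        else dl ++ [w2iGet word2idx (tokAt toks srcIdx)]) []
      -- forwards
      let dataLine2 := (PySem.List.pyRange 1 (window_size + 1) 1).foldl (fun dl dist =>
        let srcIdx := tgtIdx + dist
        if srcIdx ≥ (toks.length : Int) then dl ++ [w2iGet word2idx "<PAD>"]
        else dl ++ [w2iGet word2idx (tokAt toks srcIdx)]) dataLine
      (acc2.1 ++ [dataLine2], labels)) acc) ([], [])

-- ===== PORT B =====
def rob_skipgram_alt (tokenized_sents : List (String × List String)) (tokenizer : List (String × Int)) (word2idx : List (String × Int)) (window_size : Int) : List (List Int) × List Int :=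
  let w := max window_size 0
  tokenized_sents.foldl (fun acc p =>
    let toks := sentsGet tokenized_sents p.1
    let idxs := toks.map (fun t => w2iGet word2idx t)
    let pad := if toks ≠ [] ∧ w ≠ 0 then List.replicate w.toNat (w2iGet word2idx "<PAD>") else []
    let padded := pad ++ idxs ++ pad
    (PySem.List.pyRange 0 (toks.length : Int) 1).foldl (fun acc2 i =>
      (acc2.1 ++ [PySem.List.slice padded (some i) (some (i + w)) ++
                  PySem.List.slice padded (some (i + w + 1)) (some (i + 2 * w + 1))],
       acc2.2 ++ [(PySem.List.pyGet? idxs i).getD 0])) acc) ([], [])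

-- ===== PRECONDITION & SPEC =====
-- Pre_ excludes exactly the inputs on which Python A raises KeyError: a looked-up
-- sentence token missing from word2idx, or '<PAD>' missing while some padding lookup occurs.
def Pre_rob_skipgram (tokenized_sents : List (String × List String)) (tokenizer : List (String × Int)) (word2idx : List (String × Int)) (window_size : Int) : Prop :=
  (∀ p ∈ tokenized_sents, ∀ t ∈ sentsGet tokenized_sents p.1,
      (PySem.Dict.mk word2idx).contains t = true) ∧
  ((1 ≤ window_size ∧ ∃ p ∈ tokenized_sents, sentsGet tokenized_sents p.1 ≠ []) →
      (PySem.Dict.mk word2idx).contains "<PAD>" = true)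
instance (tokenized_sents : List (String × List String)) (tokenizer : List (String × Int)) (word2idx : List (String × Int)) (window_size : Int) : Decidable (Pre_rob_skipgram tokenized_sents tokenizer word2idx window_size) := by unfold Pre_rob_skipgram; infer_instance
def pvWitness_rob_skipgram : (List (String × List String)) × (List (String × Int)) × (List (String × Int)) × Int :=
  ([("s", ["x", "y"])], [], [("x", 1), ("y", 2), ("<PAD>", 0)], 1)
def Spec_rob_skipgram (tokenized_sents : List (String × List String)) (tokenizer : List (String × Int)) (word2idx : List (String × Int)) (window_size : Int) (out : List (List Int) × List Int) : Prop := out = rob_skipgram_alt tokenized_sents tokenizer word2idx window_size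
instance (tokenized_sents : List (String × List String)) (tokenizer : List (String × Int)) (word2idx : List (String × Int)) (window_size : Int) (out : List (List Int) × List Int) : Decidable (Spec_rob_skipgram tokenized_sents tokenizer word2idx window_size out) := by unfold Spec_rob_skipgram; infer_instance

-- ===== CLAIM (what is proved, stated in full; the proofs are below) =====
def Claim_equal_rob_skipgram : Prop := ∀ (tokenized_sents : List (String × List String)) (tokenizer : List (String × Int)) (word2idx : List (String × Int)) (window_size : Int), Dom_rob_skipgram tokenized_sents tokenizer word2idx window_size → Pre_rob_skipgram tokenized_sents tokenizer word2idx window_size → Spec_rob_skipgram tokenized_sents tokenizer word2idx window_size (rob_skipgram tokenized_sents tokenizer word2idx window_size)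

-- ===== LEMMAS AND PROOFS =====
theorem foldl_ite_append {α β : Type} (c : β → Prop) [DecidablePred c] (f g : β → α)
    (l : List β) (init : List α) :
    l.foldl (fun acc x => if c x then acc ++ [f x] else acc ++ [g x]) init
      = init ++ l.map (fun x => if c x then f x else g x) := by
  induction l generalizing init with
  | nil => simp
  | cons y ys ih =>
    simp only [List.foldl_cons, ih, List.map_cons]
    split <;> simp

theorem padded_getElem (f : String → Int) (padv : Int) (toks : List String) (W j : Nat)
    (hj : j < W + (toks.length + W)) :
    (List.replicate W padv ++ (toks.map f ++ List.replicate W padv))[j]'(by simp; omega)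
      = if j < W then padv
        else if h : j - W < toks.length then f (toks[j - W]'h) else padv := by
  by_cases h1 : j < W
  · rw [List.getElem_append_left (by simpa using h1)]
    simp [h1]
  · rw [List.getElem_append_right (by simpa using h1)]
    simp only [List.length_replicate]
    by_cases h2 : j - W < toks.length
    · rw [List.getElem_append_left (by simpa using h2)]
      simp [h1, h2]
    · rw [List.getElem_append_right (by simpa using h2)]
      simp [h1, h2]

theorem tokAt_eq (toks : List String) (j : Int) (h0 : 0 ≤ j) (hn : j < (toks.length : Int))
    (m : Nat) (hm : j.toNat = m) (hmn : m < toks.length) :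
    tokAt toks j = toks[m]'hmn := by
  unfold tokAt
  rw [PySem.List.pyGet?_eq_some_getElem _ h0 (by simpa using hn)]
  simp only [Option.getD_some]
  congr 1

theorem label_eq (word2idx : List (String × Int)) (toks : List String) (i : Int)
    (h0 : 0 ≤ i) (hn : i < (toks.length : Int)) :
    w2iGet word2idx (tokAt toks i)
      = (PySem.List.pyGet? (toks.map (fun t => w2iGet word2idx t)) i).getD 0 := by
  rw [PySem.List.pyGet?_eq_some_getElem _ h0 (by simpa using hn)]
  simp only [Option.getD_some, List.getElem_map]
  rw [tokAt_eq toks i h0 hn i.toNat rfl (by omega)]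

theorem back_slice (toks : List String) (f : String → Int) (padv : Int) (ws i : Int)
    (h0 : 0 ≤ i) (hn : i < (toks.length : Int)) (hw : 1 ≤ ws) :
    ((PySem.List.pyRange 1 (ws + 1) 1).reverse).map
        (fun d => if i - d < 0 then padv else f (tokAt toks (i - d)))
      = PySem.List.slice
          (List.replicate ws.toNat padv ++ (toks.map f ++ List.replicate ws.toNat padv))
          (some i) (some (i + ws)) := by
  rw [PySem.List.slice_toNat _ h0 (by omega)]
  apply List.ext_getElem
  · simp [PySem.List.length_pyRange_one]
    omega
  intro k hk1 hk2
  have hkW : k < ws.toNat := by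
    simpa [PySem.List.length_pyRange_one] using hk1
  simp only [List.getElem_map, List.getElem_reverse, List.getElem_take, List.getElem_drop]
  rw [PySem.List.getElem_pyRange_one]
  rw [padded_getElem f padv toks ws.toNat (i.toNat + k)
      (by simp at hk2; omega)]
  have hlen : (PySem.List.pyRange 1 (ws + 1) 1).length = ws.toNat := by
    simp [PySem.List.length_pyRange_one]
  by_cases hc : i.toNat + k < ws.toNat
  · rw [if_pos hc, if_pos (by rw [hlen]; omega)]
  · rw [if_neg hc, if_neg (by rw [hlen]; omega)]
    rw [dif_pos (by omega)]
    congr 1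
    rw [tokAt_eq toks _ (by rw [hlen]; omega) (by rw [hlen]; omega)
        (i.toNat + k - ws.toNat) (by rw [hlen]; omega) (by omega)]

theorem fwd_slice (toks : List String) (f : String → Int) (padv : Int) (ws i : Int)
    (h0 : 0 ≤ i) (hn : i < (toks.length : Int)) (hw : 1 ≤ ws) :
    (PySem.List.pyRange 1 (ws + 1) 1).map
        (fun d => if i + d ≥ (toks.length : Int) then padv else f (tokAt toks (i + d)))
      = PySem.List.slice
          (List.replicate ws.toNat padv ++ (toks.map f ++ List.replicate ws.toNat padv))
          (some (i + ws + 1)) (some (i + 2 * ws + 1)) := by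
  rw [PySem.List.slice_toNat _ (by omega) (by omega)]
  apply List.ext_getElem
  · simp [PySem.List.length_pyRange_one]
    omega
  intro k hk1 hk2
  have hkW : k < ws.toNat := by
    simpa [PySem.List.length_pyRange_one] using hk1
  simp only [List.getElem_map, List.getElem_take, List.getElem_drop]
  rw [PySem.List.getElem_pyRange_one]
  rw [padded_getElem f padv toks ws.toNat ((i + ws + 1).toNat + k)
      (by simp at hk2; omega)]
  by_cases hc : i + (1 + (k : Int)) ≥ (toks.length : Int)
  · rw [if_pos hc, if_neg (by omega), dif_neg (by omega)]
  · rw [if_neg hc, if_neg (by omega), dif_pos (by omega)]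
    congr 1
    rw [tokAt_eq toks _ (by omega) (by omega)
        ((i + ws + 1).toNat + k - ws.toNat) (by omega) (by omega)]

-- ===== VERDICT (by name: the statement is the Claim_ definition above) =====
theorem rob_skipgram_spec : Claim_equal_rob_skipgram := by
  intro ts tokenizer w2i ws _ _
  unfold Spec_rob_skipgram rob_skipgram rob_skipgram_alt
  apply PySem.List.foldl_congr_mem
  intro acc p _
  apply PySem.List.foldl_congr_mem
  intro acc2 i hi
  rw [PySem.List.mem_pyRange_one] at hi
  obtain ⟨h0, hnI⟩ := hi
  dsimp only
  set toks := sentsGet ts p.1 with htoks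
  refine Prod.ext ?_ ?_
  · dsimp only
    rw [foldl_ite_append (fun d => i - d < 0), foldl_ite_append (fun d => i + d ≥ (toks.length : Int))]
    simp only [List.nil_append]
    congr 1
    by_cases hw : 1 ≤ ws
    · -- window at least 1: pad is real, slices match the two map forms
      have htne : toks ≠ [] := by
        intro h; rw [h] at hnI; simp at hnI; omega
      have hmax : max ws 0 = ws := by omega
      rw [hmax, if_pos ⟨htne, by omega⟩]
      rw [back_slice toks _ _ ws i h0 hnI hw, fwd_slice toks _ _ ws i h0 hnI hw]
      simp [List.append_assoc]
    · -- window ≤ 0: both context lists are empty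
      have hr : PySem.List.pyRange 1 (ws + 1) 1 = [] :=
        PySem.List.pyRange_one_eq_nil (by omega)
      have hmax : max ws 0 = 0 := by omega
      rw [hr, hmax]
      simp only [List.reverse_nil, List.map_nil]
      rw [PySem.List.slice_toNat _ h0 (by omega), PySem.List.slice_toNat _ (by omega) (by omega)]
      simp
  · dsimp only
    rw [label_eq w2i toks i h0 hnI]
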